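-- pv_equiv track=rewrite | github.com/baumfalk/AdventOfCode2020 | 10/10.py | calc_possible_routes
-- ===== SOURCE A (Python) =====
-- def calc_possible_routes(current_index, output_index,num_paths, srted):
--     if current_index == output_index:
--         return 1
--     if current_index in num_paths:
--         return num_paths[current_index]
--
--     route_length = 0
--     for middle_index in range(current_index+1, len(srted)):
--         if srted[middle_index]-srted[current_index] <= 3:
--             route_length += calc_possible_routes(middle_index, output_index, num_paths, srted)
--     num_paths[current_index] = route_length
--     return route_length
-- ===== SOURCE B (Python) =====
-- # Return-value re-implementation: bottom-up DP over indices instead of memoized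
-- # recursion; B does not reproduce A's in-place mutation of num_paths (A caches
-- # results into it); the equivalence claimed is about the return value only.
-- def calc_possible_routes(current_index, output_index, num_paths, srted):
--     if current_index == output_index:
--         return 1
--     if current_index in num_paths:
--         return num_paths[current_index]
--     n = len(srted)
--     dp = {}
--     for i in range(n - 1, current_index - 1, -1):
--         if i == output_index:
--             dp[i] = 1
--         elif i in num_paths:
--             dp[i] = num_paths[i]
--         else:
--             dp[i] = sum(dp[j] for j in range(i + 1, n) if srted[j] - srted[i] <= 3)
--     return dp.get(current_index, 0)
-- ===== Notes on version B (the rewrite author's own statement) =====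
-- stated objective: alternative
-- what changed: Replaced the memoized top-down recursion with a bottom-up dynamic program that fills a dp table from the last index down to current_index and reads dp[current_index]; B does not mutate the num_paths cache in place as A does (return value agrees everywhere A returns).
import Mathlib
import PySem

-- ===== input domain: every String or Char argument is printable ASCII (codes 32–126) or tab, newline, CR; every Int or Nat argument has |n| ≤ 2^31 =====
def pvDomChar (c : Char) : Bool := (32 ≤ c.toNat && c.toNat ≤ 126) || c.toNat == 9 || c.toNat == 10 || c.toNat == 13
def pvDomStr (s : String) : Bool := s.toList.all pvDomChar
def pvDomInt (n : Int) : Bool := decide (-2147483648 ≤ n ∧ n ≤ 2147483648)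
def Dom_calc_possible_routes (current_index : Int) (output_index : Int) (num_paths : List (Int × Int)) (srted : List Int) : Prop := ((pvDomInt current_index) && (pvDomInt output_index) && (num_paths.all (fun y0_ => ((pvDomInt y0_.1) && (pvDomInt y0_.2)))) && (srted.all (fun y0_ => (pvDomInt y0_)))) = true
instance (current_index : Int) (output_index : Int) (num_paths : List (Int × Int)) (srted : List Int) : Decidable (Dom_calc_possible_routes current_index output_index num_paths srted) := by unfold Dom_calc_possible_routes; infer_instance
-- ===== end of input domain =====

-- B replaces A's memoized recursion by a bottom-up DP over indices (return value
-- only: A also caches results into num_paths in place, which B does not mutate).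

-- ===== PORT A =====
-- Threaded recursion: the pair carries (return value, the mutated num_paths dict).
-- The fuel is a totalizer only; recursion depth is bounded (indices strictly
-- increase and stay below len(srted)), and Pre_ admits exactly the inputs on
-- which the Python returns, where the fuel is proved sufficient.
def pvGoA (srted : List Int) (output_index : Int) : Nat → Int → PySem.Dict Int Int → Int × PySem.Dict Int Int
  | 0, _, d => (0, d)
  | Nat.succ fuel, i, d =>
    if i = output_index then (1, d)
    else
      match d.get? i with
      | some v => (v, d)
      | none =>
        let r := (PySem.List.pyRange (i + 1) (srted.length : Int) 1).foldl
          (fun (p : Int × PySem.Dict Int Int) m =>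
            if PySem.List.pyGetD srted m 0 - PySem.List.pyGetD srted i 0 ≤ 3 then
              let q := pvGoA srted output_index fuel m p.2
              (p.1 + q.1, q.2)
            else p) (0, d)
        (r.1, r.2.insert i r.1)

def calc_possible_routes (current_index : Int) (output_index : Int) (num_paths : List (Int × Int)) (srted : List Int) : Int :=
  (pvGoA srted output_index (2 * srted.length + 2) current_index (PySem.Dict.ofList num_paths)).1

-- ===== PORT B =====
-- dp built for i = len(srted)-1 down to current_index.
def pvDpB (srted : List Int) (output_index : Int) (np : PySem.Dict Int Int) (current_index : Int) : PySem.Dict Int Int :=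
  (PySem.List.pyRange ((srted.length : Int) - 1) (current_index - 1) (-1)).foldl
    (fun dp i =>
      dp.insert i
        (if i = output_index then 1
         else
           match np.get? i with
           | some v => v
           | none =>
             (PySem.List.pyRange (i + 1) (srted.length : Int) 1).foldl
               (fun acc j =>
                 if PySem.List.pyGetD srted j 0 - PySem.List.pyGetD srted i 0 ≤ 3 then
                   acc + dp.getD j 0
                 else acc) 0))
    PySem.Dict.empty

def calc_possible_routes_alt (current_index : Int) (output_index : Int) (num_paths : List (Int × Int)) (srted : List Int) : Int :=
  if current_index = output_index then 1
  else
    match (PySem.Dict.ofList num_paths).get? current_index with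
    | some v => v
    | none => (pvDpB srted output_index (PySem.Dict.ofList num_paths) current_index).getD current_index 0

-- ===== PRECONDITION & SPEC =====
-- Pre_ excludes exactly the inputs on which the Python A raises an IndexError:
-- current_index < -len(srted) with a nonempty loop range and no early return
-- (not the output index, not cached) makes A evaluate srted[current_index] out
-- of range.  On every other input A returns normally.
def Pre_calc_possible_routes (current_index : Int) (output_index : Int) (num_paths : List (Int × Int)) (srted : List Int) : Prop :=
  current_index = output_index ∨
  ((PySem.Dict.ofList num_paths).get? current_index).isSome = true ∨
  (srted.length : Int) ≤ current_index + 1 ∨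
  -(srted.length : Int) ≤ current_index

instance (current_index : Int) (output_index : Int) (num_paths : List (Int × Int)) (srted : List Int) : Decidable (Pre_calc_possible_routes current_index output_index num_paths srted) := by unfold Pre_calc_possible_routes; infer_instance

def pvWitness_calc_possible_routes : Int × Int × (List (Int × Int)) × List Int := (0, 3, [(2, 4)], [1, 2, 3, 5])

def Spec_calc_possible_routes (current_index : Int) (output_index : Int) (num_paths : List (Int × Int)) (srted : List Int) (out : Int) : Prop := out = calc_possible_routes_alt current_index output_index num_paths srted
instance (current_index : Int) (output_index : Int) (num_paths : List (Int × Int)) (srted : List Int) (out : Int) : Decidable (Spec_calc_possible_routes current_index output_index num_paths srted out) := by unfold Spec_calc_possible_routes; infer_instance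

-- ===== CLAIM (what is proved, stated in full; the proofs are below) =====
def Claim_equal_calc_possible_routes : Prop := ∀ (current_index : Int) (output_index : Int) (num_paths : List (Int × Int)) (srted : List Int), Dom_calc_possible_routes current_index output_index num_paths srted → Pre_calc_possible_routes current_index output_index num_paths srted → Spec_calc_possible_routes current_index output_index num_paths srted (calc_possible_routes current_index output_index num_paths srted)

-- ===== LEMMAS AND PROOFS =====

-- The common pure value: the count of admissible chains from index i, reading
-- the ORIGINAL cache np (never written).  Fuel-indexed, structurally recursive.
def pvVal (srted : List Int) (output_index : Int) (np : PySem.Dict Int Int) : Nat → Int → Int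
  | 0, _ => 0
  | Nat.succ fuel, i =>
    if i = output_index then 1
    else
      match np.get? i with
      | some v => v
      | none =>
        (PySem.List.pyRange (i + 1) (srted.length : Int) 1).foldl
          (fun acc m =>
            if PySem.List.pyGetD srted m 0 - PySem.List.pyGetD srted i 0 ≤ 3 then
              acc + pvVal srted output_index np fuel m
            else acc) 0

def pvBd (srted : List Int) (i : Int) : Nat := ((srted.length : Int) - i).toNat + 1

def pvV (srted : List Int) (output_index : Int) (np : PySem.Dict Int Int) (i : Int) : Int :=
  pvVal srted output_index np (pvBd srted i) i

lemma pvBd_lt {srted : List Int} {i m : Int} (h1 : i + 1 ≤ m) (h2 : m < (srted.length : Int)) :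
    pvBd srted m + 1 ≤ pvBd srted i := by
  unfold pvBd; omega

lemma pvVal_stab (srted : List Int) (output_index : Int) (np : PySem.Dict Int Int) :
    ∀ (f1 : Nat) (i : Int) (f2 : Nat), pvBd srted i ≤ f1 → pvBd srted i ≤ f2 →
      pvVal srted output_index np f1 i = pvVal srted output_index np f2 i := by
  intro f1
  induction f1 with
  | zero => intro i f2 h1 _; exact absurd h1 (by unfold pvBd; omega)
  | succ f1 ih =>
    intro i f2 h1 h2
    obtain ⟨f2', rfl⟩ : ∃ f2', f2 = f2' + 1 := ⟨f2 - 1, by unfold pvBd at h2; omega⟩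
    simp only [pvVal]
    split
    · rfl
    split
    · rfl
    apply PySem.List.foldl_congr_mem
    intro acc m hm
    rw [PySem.List.mem_pyRange_one] at hm
    have hb := pvBd_lt hm.1 hm.2
    rw [ih m f2' (by omega) (by unfold pvBd at h2 ⊢; omega)]

lemma pvV_eq (srted : List Int) (output_index : Int) (np : PySem.Dict Int Int) (i : Int) :
    pvV srted output_index np i =
      if i = output_index then 1
      else
        match np.get? i with
        | some v => v
        | none =>
          (PySem.List.pyRange (i + 1) (srted.length : Int) 1).foldl
            (fun acc m =>
              if PySem.List.pyGetD srted m 0 - PySem.List.pyGetD srted i 0 ≤ 3 then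
                acc + pvV srted output_index np m
              else acc) 0 := by
  conv_lhs => rw [pvV, pvBd, pvVal]
  split
  · rfl
  split
  · rfl
  apply PySem.List.foldl_congr_mem
  intro acc m hm
  rw [PySem.List.mem_pyRange_one] at hm
  have hb := pvBd_lt hm.1 hm.2
  rw [pvVal_stab srted output_index np (((srted.length : Int) - i).toNat) m (pvBd srted m)
      (by unfold pvBd at hb ⊢; omega) (le_refl _), pvV]

-- Invariant of A's threaded dict: it extends np (A never overwrites a present
-- key), and every non-output entry it holds carries the pure value.
def pvInv (srted : List Int) (output_index : Int) (np d : PySem.Dict Int Int) : Prop :=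
  (∀ k v, np.get? k = some v → d.get? k = some v) ∧
  (∀ k v, k ≠ output_index → d.get? k = some v → v = pvV srted output_index np k)

lemma pvFoldA (srted : List Int) (output_index : Int) (np : PySem.Dict Int Int) (f : Nat) (i : Int)
    (hIH : ∀ (j : Int) (d : PySem.Dict Int Int), pvInv srted output_index np d → pvBd srted j ≤ f →
      (pvGoA srted output_index f j d).1 = pvV srted output_index np j ∧
      pvInv srted output_index np (pvGoA srted output_index f j d).2) :
    ∀ (l : List Int) (acc : Int) (d : PySem.Dict Int Int),
      pvInv srted output_index np d → (∀ m ∈ l, pvBd srted m ≤ f) →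
      (l.foldl (fun (p : Int × PySem.Dict Int Int) m =>
          if PySem.List.pyGetD srted m 0 - PySem.List.pyGetD srted i 0 ≤ 3 then
            let q := pvGoA srted output_index f m p.2
            (p.1 + q.1, q.2)
          else p) (acc, d)).1
        = l.foldl (fun a m =>
            if PySem.List.pyGetD srted m 0 - PySem.List.pyGetD srted i 0 ≤ 3 then
              a + pvV srted output_index np m
            else a) acc ∧
      pvInv srted output_index np
        (l.foldl (fun (p : Int × PySem.Dict Int Int) m =>
          if PySem.List.pyGetD srted m 0 - PySem.List.pyGetD srted i 0 ≤ 3 then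
            let q := pvGoA srted output_index f m p.2
            (p.1 + q.1, q.2)
          else p) (acc, d)).2 := by
  intro l
  induction l with
  | nil => intro acc d hInv _; exact ⟨rfl, hInv⟩
  | cons x l ih =>
    intro acc d hInv hl
    by_cases hc : PySem.List.pyGetD srted x 0 - PySem.List.pyGetD srted i 0 ≤ 3
    · obtain ⟨h1, h2⟩ := hIH x d hInv (hl x (List.mem_cons_self))
      simp only [List.foldl_cons, if_pos hc, h1]
      exact ih (acc + pvV srted output_index np x) _ h2
        (fun m hm => hl m (List.mem_cons_of_mem _ hm))
    · simp only [List.foldl_cons, if_neg hc]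
      exact ih acc d hInv (fun m hm => hl m (List.mem_cons_of_mem _ hm))

lemma pvGoA_correct (srted : List Int) (output_index : Int) (np : PySem.Dict Int Int) :
    ∀ (f : Nat) (i : Int) (d : PySem.Dict Int Int),
      pvInv srted output_index np d → pvBd srted i ≤ f →
      (pvGoA srted output_index f i d).1 = pvV srted output_index np i ∧
      pvInv srted output_index np (pvGoA srted output_index f i d).2 := by
  intro f
  induction f with
  | zero => intro i d _ hb; exact absurd hb (by unfold pvBd; omega)
  | succ f ih =>
    intro i d hInv hb
    by_cases hio : i = output_index
    · subst hio
      simp only [pvGoA, if_pos]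
      refine ⟨?_, hInv⟩
      rw [pvV_eq]; simp
    cases hd : d.get? i with
    | some v =>
      simp only [pvGoA, if_neg hio, hd]
      refine ⟨?_, hInv⟩
      cases hnp : np.get? i with
      | some w =>
        have := hInv.1 i w hnp
        rw [hd] at this
        cases this
        rw [pvV_eq, if_neg hio, hnp]
      | none => exact hInv.2 i v hio hd
    | none =>
      have hnp : np.get? i = none := by
        cases hnp : np.get? i with
        | none => rfl
        | some w => rw [hInv.1 i w hnp] at hd; cases hd
      have hfold := pvFoldA srted output_index np f i ih
        (PySem.List.pyRange (i + 1) (srted.length : Int) 1) 0 d hInv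
        (by
          intro m hm
          rw [PySem.List.mem_pyRange_one] at hm
          have := pvBd_lt (srted := srted) hm.1 hm.2
          unfold pvBd at this hb ⊢
          omega)
      simp only [pvGoA, if_neg hio, hd]
      have hval : (((PySem.List.pyRange (i + 1) (srted.length : Int) 1)).foldl
          (fun (p : Int × PySem.Dict Int Int) m =>
            if PySem.List.pyGetD srted m 0 - PySem.List.pyGetD srted i 0 ≤ 3 then
              let q := pvGoA srted output_index f m p.2
              (p.1 + q.1, q.2)
            else p) (0, d)).1 = pvV srted output_index np i := by
        rw [hfold.1, pvV_eq, if_neg hio, hnp]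
      refine ⟨hval, ?_, ?_⟩
      · intro k v hk
        rw [PySem.Dict.get?_insert]
        split
        · rename_i hki; rw [hki] at hk; rw [hk] at hnp; cases hnp
        · exact hfold.2.1 k v hk
      · intro k v hko hk
        rw [PySem.Dict.get?_insert] at hk
        split at hk
        · rename_i hki; cases hk; rw [hki, hval]
        · exact hfold.2.2 k v hko hk

-- B's dp after counting down to a holds exactly the keys in (min a lo, len) with
-- the pure values.
lemma pvDpB_loop (srted : List Int) (output_index : Int) (np : PySem.Dict Int Int) (lo : Int) :
    ∀ (fm : Nat) (a : Int) (dp : PySem.Dict Int Int), (a - lo).toNat ≤ fm →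
      a ≤ (srted.length : Int) - 1 →
      (∀ k, dp.get? k = if a < k ∧ k < (srted.length : Int) then some (pvV srted output_index np k) else none) →
      ∀ k, ((PySem.List.pyRange a lo (-1)).foldl
              (fun dp i =>
                dp.insert i
                  (if i = output_index then 1
                   else
                     match np.get? i with
                     | some v => v
                     | none =>
                       (PySem.List.pyRange (i + 1) (srted.length : Int) 1).foldl
                         (fun acc j =>
                           if PySem.List.pyGetD srted j 0 - PySem.List.pyGetD srted i 0 ≤ 3 then
                             acc + dp.getD j 0
                           else acc) 0)) dp).get? k
        = if min a lo < k ∧ k < (srted.length : Int) then some (pvV srted output_index np k) else none := by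
  intro fm
  induction fm with
  | zero =>
    intro a dp hfm ha hdp k
    have hal : a ≤ lo := by omega
    rw [PySem.List.pyRange_neg_one_eq_nil hal, List.foldl_nil, hdp k]
    have : min a lo = a := by omega
    rw [this]
  | succ fm ih =>
    intro a dp hfm ha hdp k
    by_cases hal : a ≤ lo
    · rw [PySem.List.pyRange_neg_one_eq_nil hal, List.foldl_nil, hdp k]
      have : min a lo = a := by omega
      rw [this]
    · have hlo : lo < a := by omega
      rw [PySem.List.pyRange_neg_one_cons hlo, List.foldl_cons]
      have hE : (if a = output_index then (1 : Int)
         else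
           match np.get? a with
           | some v => v
           | none =>
             (PySem.List.pyRange (a + 1) (srted.length : Int) 1).foldl
               (fun acc j =>
                 if PySem.List.pyGetD srted j 0 - PySem.List.pyGetD srted a 0 ≤ 3 then
                   acc + dp.getD j 0
                 else acc) 0) = pvV srted output_index np a := by
        rw [pvV_eq]
        split
        · rfl
        cases hnp : np.get? a with
        | some v => rfl
        | none =>
          apply PySem.List.foldl_congr_mem
          intro acc j hj
          rw [PySem.List.mem_pyRange_one] at hj
          have : dp.getD j 0 = pvV srted output_index np j := by
            rw [PySem.Dict.getD_eq_get?_getD, hdp j, if_pos ⟨by omega, hj.2⟩]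
            rfl
          rw [this]
      rw [hE]
      have hres := ih (a - 1) (dp.insert a (pvV srted output_index np a)) (by omega) (by omega)
        (by
          intro k'
          rw [PySem.Dict.get?_insert]
          split
          · rename_i hk'; subst hk'
            rw [if_pos ⟨by omega, by omega⟩]
          · rw [hdp k']
            rename_i hk'
            by_cases h1 : a - 1 < k' ∧ k' < (srted.length : Int)
            · rw [if_pos h1, if_pos ⟨by omega, h1.2⟩]
            · rw [if_neg h1, if_neg (by omega)]) k
      rw [hres]
      have : min (a - 1) lo = min a lo := by omega
      rw [this]

lemma pvAltB_eq_pvV (current_index : Int) (output_index : Int) (num_paths : List (Int × Int)) (srted : List Int) :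
    calc_possible_routes_alt current_index output_index num_paths srted
      = pvV srted output_index (PySem.Dict.ofList num_paths) current_index := by
  unfold calc_possible_routes_alt
  split
  · rename_i h; rw [pvV_eq, if_pos h]
  cases hnp : (PySem.Dict.ofList num_paths).get? current_index with
  | some v => rename_i h; rw [pvV_eq, if_neg h, hnp]
  | none =>
    rename_i h
    unfold pvDpB
    have hres := pvDpB_loop srted output_index (PySem.Dict.ofList num_paths) (current_index - 1)
      (((srted.length : Int) - 1 - (current_index - 1)).toNat) ((srted.length : Int) - 1)
      PySem.Dict.empty (le_refl _) (le_refl _)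
      (by
        intro k'
        rw [PySem.Dict.get?_empty, if_neg (by omega)]) current_index
    rw [PySem.Dict.getD_eq_get?_getD, hres]
    by_cases hci : current_index < (srted.length : Int)
    · rw [if_pos ⟨by omega, hci⟩]
      rfl
    · rw [if_neg (by omega)]
      rw [pvV_eq, if_neg h, hnp, PySem.List.pyRange_one_eq_nil (by omega), List.foldl_nil]
      rfl

-- ===== VERDICT (by name: the statement is the Claim_ definition above) =====
theorem calc_possible_routes_spec : Claim_equal_calc_possible_routes := by
  intro current_index output_index num_paths srted _ hPre
  unfold Spec_calc_possible_routes
  rw [pvAltB_eq_pvV]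
  unfold calc_possible_routes
  rw [show (2 * srted.length + 2) = (2 * srted.length + 1) + 1 from rfl]
  by_cases hio : current_index = output_index
  · subst hio
    simp only [pvGoA, if_pos]
    rw [pvV_eq]; simp
  cases hnp : (PySem.Dict.ofList num_paths).get? current_index with
  | some v =>
    simp only [pvGoA, if_neg hio, hnp]
    rw [pvV_eq, if_neg hio, hnp]
  | none =>
    have hb : pvBd srted current_index ≤ 2 * srted.length + 1 + 1 := by
      unfold Pre_calc_possible_routes at hPre
      rcases hPre with h | h | h | h
      · exact absurd h hio
      · rw [hnp] at h; cases h
      · unfold pvBd; omega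
      · unfold pvBd; omega
    have hInv : pvInv srted output_index (PySem.Dict.ofList num_paths) (PySem.Dict.ofList num_paths) := by
      refine ⟨fun k v hk => hk, fun k v hko hk => ?_⟩
      rw [pvV_eq, if_neg hko, hk]
    exact (pvGoA_correct srted output_index (PySem.Dict.ofList num_paths)
      (2 * srted.length + 1 + 1) current_index (PySem.Dict.ofList num_paths) hInv hb).1
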